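-- pv_equiv track=rewrite | github.com/happypio/university | 2sem/Spring Challenge/spring-2.py | not_our_direction
-- ===== SOURCE A (Python) =====
-- def check_direction(y,x):
-- 	r = []
-- 	if y == 1:
-- 		 r.append('D')
-- 	if y == -1:
-- 		r.append('U')
-- 	if x == 1:
-- 		r.append('R')
-- 	if x == -1:
-- 		r.append('L')
-- 	return r
--
-- def not_our_direction(old_pos,new_pos,our_pos):
-- 	x = new_pos[1] - old_pos[1]
-- 	y = new_pos[0] - old_pos[0]
-- 	direction = check_direction(y,x)
-- 	x = our_pos[1] - old_pos[1]
-- 	y = our_pos[0] - old_pos[0]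
-- 	our_direction = check_direction(y,x)
-- 	for i in our_direction:
-- 		if i in direction:
-- 			return False
-- 	return True
-- ===== SOURCE B (Python) =====
-- def not_our_direction(old_pos, new_pos, our_pos):
--     dy1 = new_pos[0] - old_pos[0]
--     dx1 = new_pos[1] - old_pos[1]
--     dy2 = our_pos[0] - old_pos[0]
--     dx2 = our_pos[1] - old_pos[1]
--     return not ((dy1 == 1 and dy2 == 1) or (dy1 == -1 and dy2 == -1)
--                 or (dx1 == 1 and dx2 == 1) or (dx1 == -1 and dx2 == -1))
-- ===== Notes on version B (the rewrite author's own statement) =====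
-- stated objective: simpler
-- what changed: Replaces the direction-list builder and membership loop with one closed-form boolean over the four signed coordinate differences.
import Mathlib
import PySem

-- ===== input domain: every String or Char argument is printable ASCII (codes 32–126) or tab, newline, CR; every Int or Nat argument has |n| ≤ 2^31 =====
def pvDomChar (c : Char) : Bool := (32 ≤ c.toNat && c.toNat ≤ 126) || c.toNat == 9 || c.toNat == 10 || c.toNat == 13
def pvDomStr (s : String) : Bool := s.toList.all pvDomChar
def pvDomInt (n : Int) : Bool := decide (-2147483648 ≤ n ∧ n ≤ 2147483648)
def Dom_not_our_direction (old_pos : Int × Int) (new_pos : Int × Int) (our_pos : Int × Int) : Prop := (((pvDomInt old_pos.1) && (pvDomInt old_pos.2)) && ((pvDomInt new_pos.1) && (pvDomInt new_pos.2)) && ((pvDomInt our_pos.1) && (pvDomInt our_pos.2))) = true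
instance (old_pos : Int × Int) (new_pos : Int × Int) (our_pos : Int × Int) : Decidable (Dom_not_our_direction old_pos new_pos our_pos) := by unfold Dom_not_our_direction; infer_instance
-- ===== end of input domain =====

-- B replaces A's direction-list construction and membership loop with one closed-form
-- boolean over the four signed coordinate differences (objective: simpler).


-- ===== PORT A =====
def check_direction (y x : Int) : List String :=
  let r : List String := []
  let r := if y = 1 then r ++ ["D"] else r
  let r := if y = -1 then r ++ ["U"] else r
  let r := if x = 1 then r ++ ["R"] else r
  let r := if x = -1 then r ++ ["L"] else r
  r

-- the 'for i in our_direction: if i in direction: return False' loop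
def nodLoop (our_direction direction : List String) : Bool :=
  match our_direction with
  | [] => true
  | i :: rest => if direction.contains i then false else nodLoop rest direction

def not_our_direction (old_pos : Int × Int) (new_pos : Int × Int) (our_pos : Int × Int) : Bool :=
  let x := new_pos.2 - old_pos.2
  let y := new_pos.1 - old_pos.1
  let direction := check_direction y x
  let x2 := our_pos.2 - old_pos.2
  let y2 := our_pos.1 - old_pos.1
  let our_direction := check_direction y2 x2
  nodLoop our_direction direction

-- ===== PORT B =====
def not_our_direction_alt (old_pos : Int × Int) (new_pos : Int × Int) (our_pos : Int × Int) : Bool :=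
  let dy1 := new_pos.1 - old_pos.1
  let dx1 := new_pos.2 - old_pos.2
  let dy2 := our_pos.1 - old_pos.1
  let dx2 := our_pos.2 - old_pos.2
  !((dy1 == 1 && dy2 == 1) || (dy1 == -1 && dy2 == -1) ||
    (dx1 == 1 && dx2 == 1) || (dx1 == -1 && dx2 == -1))

-- ===== PRECONDITION & SPEC =====
def Spec_not_our_direction (old_pos : Int × Int) (new_pos : Int × Int) (our_pos : Int × Int) (out : Bool) : Prop := out = not_our_direction_alt old_pos new_pos our_pos
instance (old_pos : Int × Int) (new_pos : Int × Int) (our_pos : Int × Int) (out : Bool) : Decidable (Spec_not_our_direction old_pos new_pos our_pos out) := by unfold Spec_not_our_direction; infer_instance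

-- ===== CLAIM (what is proved, stated in full; the proofs are below) =====
def Claim_equal_not_our_direction : Prop := ∀ (old_pos : Int × Int) (new_pos : Int × Int) (our_pos : Int × Int), Dom_not_our_direction old_pos new_pos our_pos → Spec_not_our_direction old_pos new_pos our_pos (not_our_direction old_pos new_pos our_pos)

-- ===== LEMMAS AND PROOFS =====
theorem nod_eq_alt (old_pos new_pos our_pos : Int × Int) :
    not_our_direction old_pos new_pos our_pos = not_our_direction_alt old_pos new_pos our_pos := by
  obtain ⟨a, b⟩ := old_pos
  obtain ⟨c, d⟩ := new_pos
  obtain ⟨e, f⟩ := our_pos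
  simp only [not_our_direction, not_our_direction_alt, check_direction]
  by_cases h1 : c - a = 1 <;> by_cases h2 : c - a = -1 <;>
  by_cases h3 : d - b = 1 <;> by_cases h4 : d - b = -1 <;>
  by_cases h5 : e - a = 1 <;> by_cases h6 : e - a = -1 <;>
  by_cases h7 : f - b = 1 <;> by_cases h8 : f - b = -1 <;>
  simp [nodLoop, h1, h2, h3, h4, h5, h6, h7, h8]

-- ===== VERDICT (by name: the statement is the Claim_ definition above) =====
theorem not_our_direction_spec : Claim_equal_not_our_direction := by
  intro old_pos new_pos our_pos _
  exact nod_eq_alt old_pos new_pos our_pos
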